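-- pv_equiv track=rewrite | github.com/oddare/HiMolde | ProgrammeringPriv/IBE152Eksamener/2023-05-09/Task1.py | textFinder
-- ===== SOURCE A (Python) =====
-- def textFinder(text: str, size: int) -> str:
--     punctuationMarks = ['.', ',', '(', ')']
--
--     newText = ''
--     for char in text:
--         if char not in punctuationMarks:
--             newText += char
--
--     words = newText.split()
--     for word in words:
--         if len(word) == size:
--             return word
--
--     return ''
-- ===== SOURCE B (Python) =====
-- def textFinder(text: str, size: int) -> str:
--     punctuationMarks = ('.', ',', '(', ')')
--     for token in text.split():
--         cleaned = ''.join(c for c in token if c not in punctuationMarks)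
--         if len(cleaned) == size:
--             return cleaned
--     return ''
-- ===== Notes on version B (the rewrite author's own statement) =====
-- stated objective: simpler
-- what changed: B splits the raw text into whitespace tokens first and cleans punctuation inside the single search loop, instead of A's separate full-text punctuation-stripping pass followed by split and a second loop.
import Mathlib
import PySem

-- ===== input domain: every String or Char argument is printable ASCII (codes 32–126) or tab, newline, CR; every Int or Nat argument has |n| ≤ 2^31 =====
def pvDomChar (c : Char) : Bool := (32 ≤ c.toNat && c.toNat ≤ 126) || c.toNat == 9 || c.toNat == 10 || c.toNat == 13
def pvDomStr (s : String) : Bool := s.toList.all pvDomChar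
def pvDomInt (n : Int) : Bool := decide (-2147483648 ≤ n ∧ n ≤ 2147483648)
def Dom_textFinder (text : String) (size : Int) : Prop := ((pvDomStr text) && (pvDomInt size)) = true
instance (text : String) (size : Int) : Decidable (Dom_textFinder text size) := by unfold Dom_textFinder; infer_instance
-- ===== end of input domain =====

-- B fuses the punctuation cleaning into the word-search loop over text.split(), replacing A's
-- separate full-text stripping pass + split + second loop; objective: simpler (same cost).

-- ===== PORT A =====
def pvMarks : List Char := ['.', ',', '(', ')']

-- A's second loop: first word whose length equals size, else ''
def textFinderLoop : List (List Char) → Int → String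
  | [], _ => ""
  | w :: ws, size => if (w.length : Int) = size then String.ofList w else textFinderLoop ws size

def textFinder (text : String) (size : Int) : String :=
  let newText := text.toList.foldl (fun acc c => if !pvMarks.contains c then acc ++ [c] else acc) []
  textFinderLoop (PySem.Chars.split₀ newText) size

-- ===== PORT B =====
-- B's single loop: clean each raw token, return it as soon as its length equals size
def textFinder_altLoop : List (List Char) → Int → String
  | [], _ => ""
  | t :: ts, size =>
    let cleaned := t.filter (fun c => !pvMarks.contains c)
    if (cleaned.length : Int) = size then String.ofList cleaned else textFinder_altLoop ts size

def textFinder_alt (text : String) (size : Int) : String :=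
  textFinder_altLoop (PySem.Chars.split₀ text.toList) size

-- ===== PRECONDITION & SPEC =====
def Spec_textFinder (text : String) (size : Int) (out : String) : Prop := out = textFinder_alt text size
instance (text : String) (size : Int) (out : String) : Decidable (Spec_textFinder text size out) := by unfold Spec_textFinder; infer_instance

-- ===== CLAIM (what is proved, stated in full; the proofs are below) =====
def Claim_equal_textFinder : Prop := ∀ (text : String) (size : Int), Dom_textFinder text size → Spec_textFinder text size (textFinder text size)

-- ===== LEMMAS AND PROOFS =====

-- whitespace characters are never punctuation marks
theorem pv_space_not_mark (c : Char) (h : PySem.Chars.isspace c = true) :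
    (!pvMarks.contains c) = true := by
  rw [Bool.not_eq_true']
  by_contra hcon
  rw [Bool.not_eq_false] at hcon
  simp only [pvMarks, List.contains_cons, List.contains_nil, Bool.or_eq_true, beq_iff_eq] at hcon
  rcases hcon with (rfl | rfl | rfl | rfl | hfalse)
  · exact absurd h (by decide)
  · exact absurd h (by decide)
  · exact absurd h (by decide)
  · exact absurd h (by decide)
  · simp at hfalse

-- split() of a punctuation-filtered text = clean each raw token, drop the empties (go-level invariant)
theorem pv_split_go_filter :
    ∀ (rest cur : List Char) (accs : List (List Char)),
      PySem.Chars.split₀.go (rest.filter (fun c => !pvMarks.contains c))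
          (cur.filter (fun c => !pvMarks.contains c))
          ((accs.map (List.filter (fun c => !pvMarks.contains c))).filter (fun w => !w.isEmpty))
        = ((PySem.Chars.split₀.go rest cur accs).map
            (List.filter (fun c => !pvMarks.contains c))).filter (fun w => !w.isEmpty) := by
  intro rest
  induction rest with
  | nil =>
    intro cur accs
    by_cases hcur : cur.isEmpty = true
    · have hc0 : cur = [] := by simpa [List.isEmpty_iff] using hcur
      subst hc0
      simp only [List.filter_nil, PySem.Chars.split₀.go, List.isEmpty_nil, if_true]
      rw [List.map_reverse, List.filter_reverse]
    · simp only [List.filter_nil, PySem.Chars.split₀.go]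
      rw [if_neg hcur]
      by_cases h2 : (cur.filter (fun c => !pvMarks.contains c)).isEmpty = true
      · rw [if_pos h2]
        have h0 : cur.filter (fun c => !pvMarks.contains c) = [] := by
          simpa [List.isEmpty_iff] using h2
        rw [List.map_reverse, List.filter_reverse, List.map_cons, List.filter_cons]
        have hcond : (!(cur.reverse.filter (fun c => !pvMarks.contains c)).isEmpty) = false := by
          simp only [List.filter_reverse, h0, List.reverse_nil, List.isEmpty_nil, Bool.not_true]
        rw [hcond, if_neg Bool.false_ne_true]
      · rw [if_neg h2]
        have h2f : (cur.filter (fun c => !pvMarks.contains c)).isEmpty = false := by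
          cases hb : (cur.filter (fun c => !pvMarks.contains c)).isEmpty with
          | false => rfl
          | true => exact absurd hb h2
        rw [List.map_reverse, List.filter_reverse, List.map_cons, List.filter_cons]
        have hcond : (!(cur.reverse.filter (fun c => !pvMarks.contains c)).isEmpty) = true := by
          simp only [List.filter_reverse, List.isEmpty_reverse, h2f, Bool.not_false]
        rw [hcond, if_pos rfl, List.filter_reverse]
  | cons c rest ih =>
    intro cur accs
    by_cases hsp : PySem.Chars.isspace c = true
    · have hpc : (!pvMarks.contains c) = true := pv_space_not_mark c hsp
      have hfc : (c :: rest).filter (fun c => !pvMarks.contains c)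
          = c :: rest.filter (fun c => !pvMarks.contains c) := by
        rw [List.filter_cons]; rw [if_pos hpc]
      rw [hfc]
      simp only [PySem.Chars.split₀.go]
      rw [if_pos hsp, if_pos hsp]
      by_cases hcur : cur.isEmpty = true
      · have hc0 : cur = [] := by simpa [List.isEmpty_iff] using hcur
        subst hc0
        simp only [List.filter_nil, List.isEmpty_nil, if_true]
        exact ih [] accs
      · rw [if_neg hcur]
        by_cases h2 : (cur.filter (fun c => !pvMarks.contains c)).isEmpty = true
        · rw [if_pos h2]
          have h0 : cur.filter (fun c => !pvMarks.contains c) = [] := by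
            simpa [List.isEmpty_iff] using h2
          have hA : (((cur.reverse :: accs).map (List.filter (fun c => !pvMarks.contains c))).filter
                (fun w => !w.isEmpty))
              = ((accs.map (List.filter (fun c => !pvMarks.contains c))).filter
                (fun w => !w.isEmpty)) := by
            simp only [List.map_cons, List.filter_cons, List.filter_reverse, h0,
              List.reverse_nil, List.isEmpty_nil, Bool.not_true, Bool.false_eq_true, if_false]
          have h := ih [] (cur.reverse :: accs)
          rw [hA] at h
          exact h
        · have h2f : (cur.filter (fun c => !pvMarks.contains c)).isEmpty = false := by
            cases hb : (cur.filter (fun c => !pvMarks.contains c)).isEmpty with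
            | false => rfl
            | true => exact absurd hb h2
          rw [if_neg h2]
          have hA : (((cur.reverse :: accs).map (List.filter (fun c => !pvMarks.contains c))).filter
                (fun w => !w.isEmpty))
              = (cur.filter (fun c => !pvMarks.contains c)).reverse
                  :: ((accs.map (List.filter (fun c => !pvMarks.contains c))).filter
                    (fun w => !w.isEmpty)) := by
            simp only [List.map_cons, List.filter_cons, List.filter_reverse,
              List.isEmpty_reverse, h2f, Bool.not_false, if_pos]
          have h := ih [] (cur.reverse :: accs)
          rw [hA] at h
          exact h
    · have hspf : PySem.Chars.isspace c = false := by
        cases hb : PySem.Chars.isspace c with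
        | false => rfl
        | true => exact absurd hb hsp
      by_cases hpc : (!pvMarks.contains c) = true
      · have hfc : (c :: rest).filter (fun c => !pvMarks.contains c)
            = c :: rest.filter (fun c => !pvMarks.contains c) := by
          rw [List.filter_cons]; rw [if_pos hpc]
        rw [hfc]
        simp only [PySem.Chars.split₀.go, hspf]
        rw [if_neg Bool.false_ne_true, if_neg Bool.false_ne_true]
        have h := ih (c :: cur) accs
        rw [show (c :: cur).filter (fun c => !pvMarks.contains c)
            = c :: cur.filter (fun c => !pvMarks.contains c) from by
          rw [List.filter_cons]; rw [if_pos hpc]] at h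
        exact h
      · have hpcf : (!pvMarks.contains c) = false := by
          cases hb : (!pvMarks.contains c) with
          | false => rfl
          | true => exact absurd hb hpc
        have hfc : (c :: rest).filter (fun c => !pvMarks.contains c)
            = rest.filter (fun c => !pvMarks.contains c) := by
          rw [List.filter_cons]; rw [hpcf, if_neg Bool.false_ne_true]
        rw [hfc]
        conv_rhs => rw [PySem.Chars.split₀.go]
        rw [hspf, if_neg Bool.false_ne_true]
        have h := ih (c :: cur) accs
        rw [show (c :: cur).filter (fun c => !pvMarks.contains c)
            = cur.filter (fun c => !pvMarks.contains c) from by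
          rw [List.filter_cons]; rw [hpcf, if_neg Bool.false_ne_true]] at h
        exact h

theorem pv_split_filter (cs : List Char) :
    PySem.Chars.split₀ (cs.filter (fun c => !pvMarks.contains c))
      = ((PySem.Chars.split₀ cs).map (List.filter (fun c => !pvMarks.contains c))).filter
          (fun w => !w.isEmpty) := by
  have h := pv_split_go_filter cs [] []
  simpa [PySem.Chars.split₀] using h

theorem pv_loopA_zero : ∀ (l : List (List Char)), (∀ w ∈ l, w.isEmpty = false) →
    textFinderLoop l 0 = "" := by
  intro l
  induction l with
  | nil => intro _; rfl
  | cons w ws ih =>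
    intro h
    have hw := h w (List.mem_cons_self ..)
    have hne : w ≠ [] := by simpa [List.isEmpty_iff] using hw
    have hpos : 0 < w.length := List.length_pos_of_ne_nil hne
    have hlen : (w.length : Int) ≠ 0 := by omega
    simp only [textFinderLoop, if_neg hlen]
    exact ih fun x hx => h x (List.mem_cons_of_mem _ hx)

theorem pv_loop_equiv : ∀ (ts : List (List Char)) (size : Int),
    textFinderLoop ((ts.map (List.filter (fun c => !pvMarks.contains c))).filter
        (fun w => !w.isEmpty)) size
      = textFinder_altLoop ts size := by
  intro ts
  induction ts with
  | nil => intro size; rfl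
  | cons t ts ih =>
    intro size
    by_cases hc : (t.filter (fun c => !pvMarks.contains c)).isEmpty = true
    · have h0 : t.filter (fun c => !pvMarks.contains c) = [] := by
        simpa [List.isEmpty_iff] using hc
      have hl : (((t :: ts).map (List.filter (fun c => !pvMarks.contains c))).filter
            (fun w => !w.isEmpty))
          = ((ts.map (List.filter (fun c => !pvMarks.contains c))).filter (fun w => !w.isEmpty)) := by
        simp only [List.map_cons, List.filter_cons, h0, List.isEmpty_nil, Bool.not_true,
          Bool.false_eq_true, if_false]
      rw [hl]
      simp only [textFinder_altLoop, h0, List.length_nil, Nat.cast_zero]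
      by_cases hs : (0 : Int) = size
      · rw [if_pos hs]
        have hz := pv_loopA_zero
          ((ts.map (List.filter (fun c => !pvMarks.contains c))).filter (fun w => !w.isEmpty))
          (fun w hw => by simpa using (List.mem_filter.mp hw).2)
        rw [show size = (0 : Int) from hs.symm, hz]
      · rw [if_neg hs]
        exact ih size
    · have hcf : (t.filter (fun c => !pvMarks.contains c)).isEmpty = false := by
        cases hb : (t.filter (fun c => !pvMarks.contains c)).isEmpty with
        | false => rfl
        | true => exact absurd hb hc
      have hl : (((t :: ts).map (List.filter (fun c => !pvMarks.contains c))).filter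
            (fun w => !w.isEmpty))
          = (t.filter (fun c => !pvMarks.contains c))
              :: ((ts.map (List.filter (fun c => !pvMarks.contains c))).filter
                (fun w => !w.isEmpty)) := by
        rw [List.map_cons, List.filter_cons, hcf, Bool.not_false, if_pos rfl]
      rw [hl]
      simp only [textFinderLoop, textFinder_altLoop]
      by_cases hs : (((t.filter (fun c => !pvMarks.contains c)).length : Nat) : Int) = size
      · rw [if_pos hs, if_pos hs]
      · rw [if_neg hs, if_neg hs]
        exact ih size

-- ===== VERDICT (by name: the statement is the Claim_ definition above) =====
theorem textFinder_spec : Claim_equal_textFinder := by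
  intro text size _
  show textFinderLoop (PySem.Chars.split₀ (text.toList.foldl
      (fun acc c => if !pvMarks.contains c then acc ++ [c] else acc) [])) size
    = textFinder_altLoop (PySem.Chars.split₀ text.toList) size
  have hf := PySem.List.foldl_append_if (fun c => !pvMarks.contains c) (id : Char → Char)
    text.toList []
  simp only [id_eq, List.map_id, List.nil_append] at hf
  rw [hf, pv_split_filter, pv_loop_equiv]
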